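-- pv_equiv track=rewrite | github.com/rgwohlbold/quine-mccluskey-optimization | playground/chunking_cache.py | implicant_pattern_to_index
-- ===== SOURCE A (Python) =====
-- import math
--
-- def implicant_pattern_to_index(pattern: str) -> int:
--     num_bits = len(pattern)
--     num_dashes = 0
--     section_offset = 0
--     for c in pattern:
--         if c == '-':
--             section_offset += math.comb(num_bits, num_dashes) * (2 ** (num_bits - num_dashes))
--             num_dashes += 1
--     chunk_offset = 0
--     dashes_remaining = num_dashes
--     for i in range(num_bits-1, -1, -1):
--         if pattern[i] == '-':
--             dashes_remaining -= 1
--         elif dashes_remaining >= 1: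
--             chunk_offset += math.comb(i, dashes_remaining-1)
--     chunk_offset *= 2 ** (num_bits - num_dashes)
--
--     return section_offset + chunk_offset
-- ===== SOURCE B (Python) =====
-- import math
--
-- def implicant_pattern_to_index(pattern: str) -> int:
--     n = len(pattern)
--     dashes = [i for i, c in enumerate(pattern) if c == '-']
--     k = len(dashes)
--     section_offset = sum(math.comb(n, j) * 2 ** (n - j) for j in range(k))
--     # rank of the dash-position set by hockey-stick telescoping: the j-th gap
--     # (between dash j and the next dash, or the end) contributes
--     # comb(q, j+1) - comb(p+1, j+1); no per-character comb accumulation.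
--     chunk = sum(math.comb(q, j + 1) - math.comb(p + 1, j + 1)
--                 for j, (p, q) in enumerate(zip(dashes, dashes[1:] + [n])))
--     return section_offset + chunk * 2 ** (n - k)
-- ===== Notes on version B (the rewrite author's own statement) =====
-- stated objective: alternative
-- what changed: The per-section rank is no longer accumulated character by character: B collects the dash positions once and computes the rank as a closed-form hockey-stick-telescoped sum comb(q,j+1)-comb(p+1,j+1) over consecutive dash-position pairs (O(#dashes) comb terms instead of O(n)), and the section offset becomes a formula over the dash count.
import Mathlib
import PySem

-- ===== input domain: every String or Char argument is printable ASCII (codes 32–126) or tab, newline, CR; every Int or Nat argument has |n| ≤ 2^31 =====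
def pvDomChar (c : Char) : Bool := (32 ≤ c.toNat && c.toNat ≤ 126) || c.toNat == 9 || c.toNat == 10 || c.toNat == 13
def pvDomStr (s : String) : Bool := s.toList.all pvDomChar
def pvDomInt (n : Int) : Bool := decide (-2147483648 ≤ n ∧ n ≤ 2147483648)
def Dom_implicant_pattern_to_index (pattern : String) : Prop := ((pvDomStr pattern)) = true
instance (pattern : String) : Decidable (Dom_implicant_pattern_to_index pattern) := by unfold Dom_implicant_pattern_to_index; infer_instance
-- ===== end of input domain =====

-- B replaces A's per-character rank accumulation by a closed-form (hockey-stick-telescoped)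
-- sum over consecutive dash-position pairs, and the section offset by a formula over the
-- dash count (objective: alternative).

-- ===== PORT A =====
-- A, step for step: first loop accumulates num_dashes and section_offset over the characters;
-- second loop walks i = num_bits-1 .. 0 (range(num_bits-1,-1,-1)) reading pattern[i].
-- pattern[i] is ported as pyGetD with a dummy default: every i produced by the range is in
-- bounds, so the default is never read and the port is exact.
-- dashes_remaining / comb arguments stay ≥ 0 in Python (counts of dashes), so Nat state is exact.
def implicant_pattern_to_index (pattern : String) : Int :=
  let cs := pattern.toList
  let num_bits := cs.length
  let s1 := cs.foldl (fun (st : Nat × Int) c =>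
      if c = '-' then (st.1 + 1, st.2 + (num_bits.choose st.1 : Int) * 2 ^ (num_bits - st.1))
      else st) (0, 0)
  let num_dashes := s1.1
  let section_offset := s1.2
  let s2 := (PySem.List.pyRange ((num_bits : Int) - 1) (-1) (-1)).foldl
      (fun (st : Int × Nat) i =>
        if PySem.List.pyGetD cs i ' ' = '-' then (st.1, st.2 - 1)
        else if 1 ≤ st.2 then (st.1 + ((i.toNat.choose (st.2 - 1) : Nat) : Int), st.2)
        else st) (0, num_dashes)
  let chunk_offset := s2.1 * 2 ^ (num_bits - num_dashes)
  section_offset + chunk_offset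

-- ===== PORT B =====
-- Source B, step for step: dash-position comprehension ([i for i,c in enumerate(p) if c=='-']),
-- section offset as a sum over range(k), and the chunk as the sum over
-- enumerate(zip(dashes, dashes[1:] + [n])) of comb(q, j+1) - comb(p+1, j+1).
-- All comb arguments are ≥ 0 in Python (indices / counts), so .toNat is exact.
def implicant_pattern_to_index_alt (pattern : String) : Int :=
  let cs := pattern.toList
  let n := cs.length
  let dashes := ((PySem.List.enumerate cs 0).filter (fun p => p.2 == '-')).map (·.1)
  let k := dashes.length
  let section_offset :=
    ((PySem.List.pyRange 0 (k : Int) 1).map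
      (fun j => (n.choose j.toNat : Int) * 2 ^ (n - j.toNat))).sum
  let pairs := dashes.zip (PySem.List.slice dashes (some 1) none ++ [(n : Int)])
  let chunk :=
    ((PySem.List.enumerate pairs 0).map
      (fun t => ((t.2.2.toNat.choose (t.1.toNat + 1) : Nat) : Int)
              - (((t.2.1 + 1).toNat.choose (t.1.toNat + 1) : Nat) : Int))).sum
  section_offset + chunk * 2 ^ (n - k)

-- ===== PRECONDITION & SPEC =====
def Spec_implicant_pattern_to_index (pattern : String) (out : Int) : Prop := out = implicant_pattern_to_index_alt pattern
instance (pattern : String) (out : Int) : Decidable (Spec_implicant_pattern_to_index pattern out) := by unfold Spec_implicant_pattern_to_index; infer_instance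

-- ===== CLAIM (what is proved, stated in full; the proofs are below) =====
def Claim_equal_implicant_pattern_to_index : Prop := ∀ (pattern : String), Dom_implicant_pattern_to_index pattern → Spec_implicant_pattern_to_index pattern (implicant_pattern_to_index pattern)

-- ===== LEMMAS AND PROOFS =====

-- A's backward loop body, on enumerated (index, char) pairs
def pvFA : Int × Nat → Int × Char → Int × Nat := fun st p =>
  if p.2 = '-' then (st.1, st.2 - 1)
  else if 1 ≤ st.2 then (st.1 + ((p.1.toNat.choose (st.2 - 1) : Nat) : Int), st.2)
  else st

-- forward characterization of A's backward loop: running dash count r, add comb(i, r-1) at non-dashes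
def pvChunk (l : List (Int × Char)) (r : Nat) : Int :=
  match l with
  | [] => 0
  | x :: t =>
    if x.2 = '-' then pvChunk t (r + 1)
    else (if 1 ≤ r then ((x.1.toNat.choose (r - 1) : Nat) : Int) else 0) + pvChunk t r

theorem pv_back (l : List (Int × Char)) : ∀ (c : Int) (r : Nat),
    l.reverse.foldl pvFA (c, r + l.countP (fun p => p.2 == '-')) = (c + pvChunk l r, r) := by
  induction l with
  | nil => intro c r; simp [pvChunk]
  | cons x t ih =>
    intro c r
    rw [List.reverse_cons, List.foldl_append]
    by_cases hx : x.2 = '-'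
    · have h1 : r + (x :: t).countP (fun p => p.2 == '-') = (r + 1) + t.countP (fun p => p.2 == '-') := by
        simp [List.countP_cons, hx]; omega
      rw [h1, ih c (r + 1)]
      simp [pvFA, pvChunk, hx]
    · have h1 : r + (x :: t).countP (fun p => p.2 == '-') = r + t.countP (fun p => p.2 == '-') := by
        simp [List.countP_cons, hx]
      rw [h1, ih c r]
      by_cases hr : 1 ≤ r
      · simp [pvFA, pvChunk, hx, hr]; ring
      · simp [pvFA, pvChunk, hx, hr]

-- A's first loop body and the closed section formula
def pvFS (n : Nat) : Nat × Int → Char → Nat × Int := fun st c =>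
  if c = '-' then (st.1 + 1, st.2 + (n.choose st.1 : Int) * 2 ^ (n - st.1)) else st

def pvSec (n k m : Nat) : Int :=
  ((List.range m).map (fun j => (n.choose (k + j) : Int) * 2 ^ (n - (k + j)))).sum

theorem pv_sec (n : Nat) (cs : List Char) : ∀ (k : Nat) (s : Int),
    cs.foldl (pvFS n) (k, s) = (k + cs.countP (· == '-'), s + pvSec n k (cs.countP (· == '-'))) := by
  induction cs with
  | nil => intro k s; simp [pvSec]
  | cons c t ih =>
    intro k s
    by_cases hc : c = '-'
    · have hsec : pvSec n k (t.countP (· == '-') + 1)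
          = (n.choose k : Int) * 2 ^ (n - k) + pvSec n (k + 1) (t.countP (· == '-')) := by
        simp only [pvSec, List.range_succ_eq_map, List.map_cons, List.map_map, List.sum_cons]
        congr 1
        refine congrArg List.sum (List.map_congr_left ?_)
        intro j _
        simp only [Function.comp_apply, Nat.succ_eq_add_one]
        rw [show k + (j + 1) = k + 1 + j from by omega]
      simp [pvFS, hc, ih, List.countP_cons, hsec]
      constructor
      · omega
      · ring
    · simp [pvFS, hc, ih, List.countP_cons]

theorem pv_enum_count (cs : List Char) : ∀ (s : Int),
    (PySem.List.enumerate cs s).countP (fun p => p.2 == '-') = cs.countP (· == '-') := by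
  induction cs with
  | nil => intro s; simp [PySem.List.enumerate_nil]
  | cons c t ih => intro s; simp [PySem.List.enumerate_cons, List.countP_cons, ih]

-- binomial coefficient on a nonnegative Int
def pvCb (x : Int) (t : Nat) : Int := ((x.toNat.choose t : Nat) : Int)

-- gap decomposition of the rank: dash positions P in [a, e), running dash count r;
-- each gap contributes cb(right end, r) - cb(left end, r) (hockey stick)
def pvG : List Int → Int → Int → Nat → Int
  | [], a, e, r => if 1 ≤ r then pvCb e r - pvCb a r else 0
  | p :: P, a, e, r => (if 1 ≤ r then pvCb p r - pvCb a r else 0) + pvG P (p + 1) e (r + 1)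

def pvDash (l : List (Int × Char)) : List Int := (l.filter (fun p => p.2 == '-')).map (·.1)

-- Pascal step: advancing the left end of the current gap by one costs cb a (r-1)
theorem pv_step (P : List Int) (a e : Int) (r : Nat) (ha : 0 ≤ a) :
    pvG P a e r = (if 1 ≤ r then pvCb a (r - 1) else 0) + pvG P (a + 1) e r := by
  have hpas : ∀ x : Int, 1 ≤ r → pvCb x r - pvCb a r
      = pvCb a (r - 1) + (pvCb x r - pvCb (a + 1) r) := by
    intro x hr
    have h1 : (a + 1).toNat = a.toNat + 1 := by omega
    have h2 : (a.toNat + 1).choose ((r - 1) + 1) = a.toNat.choose (r - 1) + a.toNat.choose ((r - 1) + 1) :=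
      Nat.choose_succ_succ _ _
    have h3 : (r - 1) + 1 = r := by omega
    rw [h3] at h2
    simp only [pvCb, h1, h2]
    push_cast
    ring
  cases P with
  | nil =>
    by_cases hr : 1 ≤ r
    · simp only [pvG, hr, if_pos]
      rw [hpas e hr]
    · simp [pvG, hr]
  | cons p P =>
    by_cases hr : 1 ≤ r
    · simp only [pvG, hr, if_pos]
      rw [hpas p hr]
      ring
    · simp [pvG, hr]

-- A's rank scan equals the gap decomposition over the dash positions
theorem pv_L1 (cs : List Char) : ∀ (s r : Nat),
    pvChunk (PySem.List.enumerate cs (s : Int)) r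
      = pvG (pvDash (PySem.List.enumerate cs (s : Int))) (s : Int) ((s : Int) + cs.length) r := by
  induction cs with
  | nil => intro s r; simp [PySem.List.enumerate_nil, pvChunk, pvDash, pvG]
  | cons c t ih =>
    intro s r
    have hs1 : (s : Int) + 1 = ((s + 1 : Nat) : Int) := by push_cast; ring
    have he : ((s + 1 : Nat) : Int) + (t.length : Int) = (s : Int) + ((c :: t).length : Int) := by
      simp only [List.length_cons]; push_cast; ring
    by_cases hc : c = '-'
    · have hcb : (c == '-') = true := by simp [hc]
      simp only [PySem.List.enumerate_cons, pvChunk, pvDash, List.filter_cons, hcb,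
        if_pos, List.map_cons, hc]
      rw [hs1]
      have := ih (s + 1) (r + 1)
      simp only [pvDash] at this
      rw [this, he]
      simp [pvG, sub_self]
    · have hcb : (c == '-') = false := by simp [hc]
      simp only [PySem.List.enumerate_cons, pvChunk, pvDash, List.filter_cons, hcb,
        Bool.false_eq_true, if_false, if_neg hc]
      rw [hs1]
      have := ih (s + 1) r
      simp only [pvDash] at this
      rw [this, he]
      rw [pv_step _ (s : Int) _ r (by positivity), ← hs1]
      simp only [pvCb, Int.toNat_natCast]

-- B's zip/enumerate sum computes the gap decomposition
theorem pv_L3 (P : List Int) : ∀ (p e : Int) (j : Nat),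
    ((PySem.List.enumerate ((p :: P).zip (P ++ [e])) (j : Int)).map
      (fun t => ((t.2.2.toNat.choose (t.1.toNat + 1) : Nat) : Int)
              - (((t.2.1 + 1).toNat.choose (t.1.toNat + 1) : Nat) : Int))).sum
      = pvG P (p + 1) e (j + 1) := by
  induction P with
  | nil =>
    intro p e j
    simp [PySem.List.enumerate_cons, PySem.List.enumerate_nil, pvG, pvCb]
  | cons q P ih =>
    intro p e j
    have hz : (p :: q :: P).zip ((q :: P) ++ [e]) = (p, q) :: ((q :: P).zip (P ++ [e])) := by
      simp [List.zip_cons_cons]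
    rw [hz, PySem.List.enumerate_cons, List.map_cons, List.sum_cons]
    have hj1 : (j : Int) + 1 = ((j + 1 : Nat) : Int) := by push_cast; ring
    rw [hj1, ih q e (j + 1)]
    simp only [pvG, pvCb]
    simp only [Int.toNat_natCast, le_add_iff_nonneg_left, Nat.zero_le, if_pos]

-- main equality
theorem pv_main (pattern : String) :
    implicant_pattern_to_index pattern = implicant_pattern_to_index_alt pattern := by
  unfold implicant_pattern_to_index implicant_pattern_to_index_alt
  simp only []
  set cs := pattern.toList with hcs
  set n := cs.length with hn
  set m := cs.countP (· == '-') with hm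
  -- A's first loop
  have hA1 : cs.foldl (fun (st : Nat × Int) c =>
      if c = '-' then (st.1 + 1, st.2 + (n.choose st.1 : Int) * 2 ^ (n - st.1))
      else st) (0, 0) = (0 + m, 0 + pvSec n 0 m) := pv_sec n cs 0 0
  rw [hA1]
  -- B's dash positions and count
  have hB0 : (((PySem.List.enumerate cs 0).filter (fun p => p.2 == '-')).map (·.1)).length = m := by
    rw [List.length_map, ← List.countP_eq_length_filter, pv_enum_count]
  rw [hB0]
  -- A's countdown loop is pvChunk over the enumerated characters
  have hA2 : (PySem.List.pyRange ((n : Int) - 1) (-1) (-1)).foldl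
      (fun (st : Int × Nat) i =>
        if PySem.List.pyGetD cs i ' ' = '-' then (st.1, st.2 - 1)
        else if 1 ≤ st.2 then (st.1 + ((i.toNat.choose (st.2 - 1) : Nat) : Int), st.2)
        else st) (0, 0 + m) = (0 + pvChunk (PySem.List.enumerate cs 0) 0, 0) := by
    have hR : PySem.List.pyRange ((n : Int) - 1) (-1) (-1)
        = ((PySem.List.enumerate cs 0).map (fun p : Int × Char => p.1)).reverse := by
      rw [PySem.List.pyRange_neg_one_eq_reverse]
      norm_num
      rw [PySem.List.map_fst_enumerate]
      norm_num
      rfl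
    have hmap : PySem.List.pyRange ((n : Int) - 1) (-1) (-1)
        = ((PySem.List.enumerate cs 0).reverse).map (fun p : Int × Char => p.1) := by
      rw [hR, List.map_reverse]
    rw [hmap, List.foldl_map]
    have hcong : ∀ (acc : Int × Nat) (x : Int × Char), x ∈ (PySem.List.enumerate cs 0).reverse →
        (if PySem.List.pyGetD cs x.1 ' ' = '-' then (acc.1, acc.2 - 1)
         else if 1 ≤ acc.2 then (acc.1 + ((x.1.toNat.choose (acc.2 - 1) : Nat) : Int), acc.2)
         else acc) = pvFA acc x := by
      intro acc x hx
      rw [List.mem_reverse, PySem.List.mem_enumerate_iff] at hx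
      obtain ⟨k, hk, rfl⟩ := hx
      have hget : PySem.List.pyGetD cs ((0 : Int) + k) ' ' = cs[k] := by
        rw [show ((0 : Int) + k) = (k : Int) from by omega, PySem.List.pyGetD_natCast,
          List.getD_eq_getElem?_getD, List.getElem?_eq_getElem hk, Option.getD_some]
      simp only [pvFA, hget]
    have hthis := pv_back (PySem.List.enumerate cs 0) 0 0
    rw [pv_enum_count] at hthis
    exact (PySem.List.foldl_congr_mem _ _ _ _ hcong).trans hthis
  rw [hA2]
  -- B's section sum
  have hBsec : ((PySem.List.pyRange 0 (m : Int) 1).map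
      (fun j => (n.choose j.toNat : Int) * 2 ^ (n - j.toNat))).sum = pvSec n 0 m := by
    rw [PySem.List.pyRange_one, List.map_map]
    unfold pvSec
    rw [show (((m : Int) - 0).toNat) = m from by omega]
    refine congrArg List.sum (List.map_congr_left ?_)
    intro j hj
    simp
  rw [hBsec]
  -- A's rank = B's zip sum, via the gap decomposition
  have hchunk : pvChunk (PySem.List.enumerate cs 0) 0
      = ((PySem.List.enumerate
          ((((PySem.List.enumerate cs 0).filter (fun p => p.2 == '-')).map (·.1)).zip
            (PySem.List.slice (((PySem.List.enumerate cs 0).filter (fun p => p.2 == '-')).map (·.1))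
              (some 1) none ++ [(n : Int)])) 0).map
        (fun t => ((t.2.2.toNat.choose (t.1.toNat + 1) : Nat) : Int)
                - (((t.2.1 + 1).toNat.choose (t.1.toNat + 1) : Nat) : Int))).sum := by
    have hL1 := pv_L1 cs 0 0
    simp only [Nat.cast_zero, zero_add] at hL1
    rw [hL1, PySem.List.slice_from_one]
    have hD' : ((PySem.List.enumerate cs 0).filter (fun p => p.2 == '-')).map (·.1)
        = pvDash (PySem.List.enumerate cs 0) := rfl
    rw [hD']
    cases h : pvDash (PySem.List.enumerate cs 0) with
    | nil => simp [pvG, PySem.List.enumerate_nil]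
    | cons p P =>
      have h3 := pv_L3 P p (n : Int) 0
      simp only [Nat.cast_zero] at h3
      simp only [hn] at h3 ⊢
      rw [List.tail_cons]
      have hG : pvG (p :: P) 0 ((cs.length : Nat) : Int) 0 = pvG P (p + 1) ((cs.length : Nat) : Int) (0 + 1) := by
        simp [pvG]
      rw [hG]
      exact h3.symm
  rw [hchunk]
  ring_nf

-- ===== VERDICT (by name: the statement is the Claim_ definition above) =====
theorem implicant_pattern_to_index_spec : Claim_equal_implicant_pattern_to_index := by
  intro pattern _
  unfold Spec_implicant_pattern_to_index
  exact pv_main pattern
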